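-- pv_equiv track=rewrite | github.com/rogertesta7-cpu/ARQ-ALPHA-V2 | src/services/regulatory_context.py | _assess_compliance_priority
-- ===== SOURCE A (Python) =====
-- from typing import Dict, List, Optional, Any
--
-- def _assess_compliance_priority(sectors: List[str]) -> str:
--     """Avalia prioridade de compliance"""
--     critical_sectors = ['financial_services', 'healthcare']
--     high_priority_sectors = ['food_supplements', 'digital_marketing']
--
--     if any(sector in critical_sectors for sector in sectors):
--         return 'critical'
--     elif any(sector in high_priority_sectors for sector in sectors):
--         return 'high'
--     else:
--         return 'medium'
-- ===== SOURCE B (Python) =====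
-- _RANK = {
--     'financial_services': 0,
--     'healthcare': 0,
--     'food_supplements': 1,
--     'digital_marketing': 1,
-- }
-- _NAMES = ('critical', 'high', 'medium')
--
--
-- def _assess_compliance_priority(sectors):
--     """Single table-driven pass: keep the minimum priority rank seen."""
--     best = 2
--     for sector in sectors:
--         r = _RANK.get(sector, 2)
--         if r < best:
--             best = r
--     return _NAMES[best]
-- ===== Notes on version B (the rewrite author's own statement) =====
-- stated objective: alternative
-- what changed: Replaces the two short-circuit any()-membership scans over hardcoded lists with one table-driven pass that keeps the minimum priority rank from a sector->rank dict and translates the best rank to a label at the end.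
import Mathlib
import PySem

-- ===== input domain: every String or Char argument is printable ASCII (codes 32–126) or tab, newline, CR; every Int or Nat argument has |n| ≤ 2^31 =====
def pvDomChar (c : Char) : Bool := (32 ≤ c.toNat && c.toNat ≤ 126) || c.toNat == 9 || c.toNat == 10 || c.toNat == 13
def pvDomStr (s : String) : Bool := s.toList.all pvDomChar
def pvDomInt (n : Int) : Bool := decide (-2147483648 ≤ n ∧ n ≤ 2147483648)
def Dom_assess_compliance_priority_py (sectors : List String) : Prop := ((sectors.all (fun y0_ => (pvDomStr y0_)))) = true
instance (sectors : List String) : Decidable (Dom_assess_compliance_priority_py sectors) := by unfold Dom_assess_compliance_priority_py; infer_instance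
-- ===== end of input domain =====

-- ===== PORT A =====
-- B replaces A's two any()-membership scans with one table-driven minimum-rank pass (objective: alternative decomposition, same cost).
def assess_compliance_priority_py (sectors : List String) : String :=
  let critical_sectors : List String := ["financial_services", "healthcare"]
  let high_priority_sectors : List String := ["food_supplements", "digital_marketing"]
  if sectors.any (fun sector => decide (sector ∈ critical_sectors)) then "critical"
  else if sectors.any (fun sector => decide (sector ∈ high_priority_sectors)) then "high"
  else "medium"

-- ===== PORT B =====
def pvRankDict : PySem.Dict String Nat :=
  PySem.Dict.ofList [("financial_services", 0), ("healthcare", 0), ("food_supplements", 1), ("digital_marketing", 1)]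

def assess_compliance_priority_py_alt (sectors : List String) : String :=
  let best := sectors.foldl (fun best sector =>
    let r := PySem.Dict.getD pvRankDict sector 2
    if r < best then r else best) 2
  match best with
  | 0 => "critical"
  | 1 => "high"
  | _ => "medium"

-- ===== PRECONDITION & SPEC =====
def Spec_assess_compliance_priority_py (sectors : List String) (out : String) : Prop := out = assess_compliance_priority_py_alt sectors
instance (sectors : List String) (out : String) : Decidable (Spec_assess_compliance_priority_py sectors out) := by unfold Spec_assess_compliance_priority_py; infer_instance

-- ===== CLAIM (what is proved, stated in full; the proofs are below) =====
def Claim_equal_assess_compliance_priority_py : Prop := ∀ (sectors : List String), Dom_assess_compliance_priority_py sectors → Spec_assess_compliance_priority_py sectors (assess_compliance_priority_py sectors)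

-- ===== LEMMAS AND PROOFS =====

lemma pvRank_eq (s : String) :
    PySem.Dict.getD pvRankDict s 2 =
      (if s ∈ (["financial_services", "healthcare"] : List String) then 0
       else if s ∈ (["food_supplements", "digital_marketing"] : List String) then 1
       else 2) := by
  by_cases h1 : s ∈ (["financial_services", "healthcare"] : List String)
  · rw [if_pos h1]
    simp only [List.mem_cons, List.not_mem_nil, or_false] at h1
    rcases h1 with h | h <;> subst h <;> decide
  · rw [if_neg h1]
    by_cases h2 : s ∈ (["food_supplements", "digital_marketing"] : List String)
    · rw [if_pos h2]
      simp only [List.mem_cons, List.not_mem_nil, or_false] at h2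
      rcases h2 with h | h <;> subst h <;> decide
    · rw [if_neg h2]
      simp only [List.mem_cons, List.not_mem_nil, or_false, not_or] at h1 h2
      obtain ⟨n1, n2⟩ := h1
      obtain ⟨n3, n4⟩ := h2
      have hd : pvRankDict = PySem.Dict.mk
          [("financial_services", 0), ("healthcare", 0), ("food_supplements", 1), ("digital_marketing", 1)] := rfl
      have b1 : (("financial_services" : String) == s) = false := beq_eq_false_iff_ne.mpr (Ne.symm n1)
      have b2 : (("healthcare" : String) == s) = false := beq_eq_false_iff_ne.mpr (Ne.symm n2)
      have b3 : (("food_supplements" : String) == s) = false := beq_eq_false_iff_ne.mpr (Ne.symm n3)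
      have b4 : (("digital_marketing" : String) == s) = false := beq_eq_false_iff_ne.mpr (Ne.symm n4)
      have hnil : (PySem.Dict.mk ([] : List (String × Nat))).get? s = none := rfl
      rw [hd]
      simp [PySem.Dict.getD_eq_get?_getD, PySem.Dict.get?_mk_cons, b1, b2, b3, b4, hnil]

lemma pvFold_eval (l : List String) : ∀ b : Nat, b ≤ 2 →
    l.foldl (fun best sector =>
      let r := PySem.Dict.getD pvRankDict sector 2
      if r < best then r else best) b =
    min b (if (l.any fun sector => decide (sector ∈ (["financial_services", "healthcare"] : List String))) = true then 0
           else if (l.any fun sector => decide (sector ∈ (["food_supplements", "digital_marketing"] : List String))) = true then 1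
           else 2) := by
  induction l with
  | nil => intro b hb; simp; omega
  | cons s t ih =>
    intro b hb
    have hr := pvRank_eq s
    have hb' : (if PySem.Dict.getD pvRankDict s 2 < b then PySem.Dict.getD pvRankDict s 2 else b) ≤ 2 := by
      rw [hr]; split_ifs <;> omega
    simp only [List.foldl_cons, List.any_cons]
    refine Eq.trans (ih _ hb') ?_
    rw [hr]
    by_cases c1 : s ∈ (["financial_services", "healthcare"] : List String) <;>
      by_cases c2 : s ∈ (["food_supplements", "digital_marketing"] : List String) <;>
        simp [c1, c2] <;> split_ifs <;> omega

lemma pvFold_eval' (sectors : List String) :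
    sectors.foldl (fun best sector =>
      let r := PySem.Dict.getD pvRankDict sector 2
      if r < best then r else best) 2 =
    (if (sectors.any fun sector => decide (sector ∈ (["financial_services", "healthcare"] : List String))) = true then 0
     else if (sectors.any fun sector => decide (sector ∈ (["food_supplements", "digital_marketing"] : List String))) = true then 1
     else 2) := by
  rw [pvFold_eval sectors 2 (le_refl 2)]
  split_ifs <;> omega

-- ===== VERDICT (by name: the statement is the Claim_ definition above) =====
theorem assess_compliance_priority_py_spec : Claim_equal_assess_compliance_priority_py := by
  intro sectors _
  unfold Spec_assess_compliance_priority_py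
  have hA : assess_compliance_priority_py sectors =
      (if (sectors.any fun sector => decide (sector ∈ (["financial_services", "healthcare"] : List String))) = true then "critical"
       else if (sectors.any fun sector => decide (sector ∈ (["food_supplements", "digital_marketing"] : List String))) = true then "high"
       else "medium") := rfl
  have hB : assess_compliance_priority_py_alt sectors =
      (match sectors.foldl (fun best sector =>
        let r := PySem.Dict.getD pvRankDict sector 2
        if r < best then r else best) 2 with
       | 0 => "critical"
       | 1 => "high"
       | _ => "medium") := rfl
  rw [hA, hB, pvFold_eval']
  split_ifs <;> rfl
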